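-- pv_equiv track=rewrite | github.com/idelaniyariets/templates-for-inf_ege | solutions/n_23/257721.py | f
-- ===== SOURCE A (Python) =====
-- def f(start, end):
--     if start == end:
--         return 1
--     if start < end:
--         return 0
--     if start > end:
--         return f(start-4, end) + f(start-11, end) + f(start//2, end)
--     return None
-- ===== SOURCE B (Python) =====
-- def f(start, end):
--     # Bottom-up DP: tabulate the number of reduction paths for every value
--     # from end up to start, so each subproblem is computed once.
--     if start < end:
--         return 0
--     ways = {end: 1}
--     for x in range(end + 1, start + 1):
--         ways[x] = ways.get(x - 4, 0) + ways.get(x - 11, 0) + ways.get(x // 2, 0)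
--     return ways[start]
-- ===== Notes on version B (the rewrite author's own statement) =====
-- stated objective: alternative
-- what changed: Replaced the triple recursion by a bottom-up dynamic-programming table filled once from end to start, so each value is computed a single time.
import Mathlib
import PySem

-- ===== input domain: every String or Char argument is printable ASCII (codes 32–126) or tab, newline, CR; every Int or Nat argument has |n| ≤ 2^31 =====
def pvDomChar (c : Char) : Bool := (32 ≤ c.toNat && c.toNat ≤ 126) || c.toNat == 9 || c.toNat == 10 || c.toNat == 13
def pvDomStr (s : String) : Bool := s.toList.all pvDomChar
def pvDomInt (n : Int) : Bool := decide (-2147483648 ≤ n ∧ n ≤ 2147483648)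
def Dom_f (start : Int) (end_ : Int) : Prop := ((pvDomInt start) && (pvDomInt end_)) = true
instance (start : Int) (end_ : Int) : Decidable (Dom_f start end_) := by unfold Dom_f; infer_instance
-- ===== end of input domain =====

-- B replaces A's triple recursion by a bottom-up DP table, each value computed once (alternative algorithm).

-- ===== PORT A =====
-- Literal port of A's recursion.  The 'end_ < 0' guard only totalises the
-- definition: there Python recurses forever (outside Pre_f, nothing is claimed).
def f (start : Int) (end_ : Int) : Int :=
  if start = end_ then 1
  else if start < end_ then 0
  else if end_ < 0 then 0
  else f (start - 4) end_ + f (start - 11) end_ + f (PySem.Int.floordiv start 2) end_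
termination_by (start - end_).toNat
decreasing_by
  · omega
  · omega
  · have h2 : PySem.Int.floordiv start 2 < start :=
      (PySem.Int.floordiv_lt_iff_lt_mul (a := start) (q := start) (by omega)).mpr (by omega)
    omega

-- ===== PORT B =====
-- Port of Source B: fill 'ways' from end_+1 up to start; ways[start] is always
-- present (start ≥ end_ there), so Python's ways[start] lookup is total.
def f_alt (start : Int) (end_ : Int) : Int :=
  if start < end_ then 0
  else
    let ways := (PySem.List.pyRange (end_ + 1) (start + 1) 1).foldl
      (fun d x => d.insert x
        (d.getD (x - 4) 0 + d.getD (x - 11) 0 + d.getD (PySem.Int.floordiv x 2) 0))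
      ((PySem.Dict.empty).insert end_ 1)
    ways.getD start 0

-- ===== PRECONDITION & SPEC =====
-- Pre_f excludes exactly the inputs (end < 0 with start > end) on which the
-- Python A recurses forever and raises RecursionError.
def Pre_f (start : Int) (end_ : Int) : Prop := start ≤ end_ ∨ 0 ≤ end_
instance (start : Int) (end_ : Int) : Decidable (Pre_f start end_) := by unfold Pre_f; infer_instance
def pvWitness_f : Int × Int := (10, 0)

def Spec_f (start : Int) (end_ : Int) (out : Int) : Prop := out = f_alt start end_
instance (start : Int) (end_ : Int) (out : Int) : Decidable (Spec_f start end_ out) := by unfold Spec_f; infer_instance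

-- ===== CLAIM (what is proved, stated in full; the proofs are below) =====
def Claim_equal_f : Prop := ∀ (start : Int) (end_ : Int), Dom_f start end_ → Pre_f start end_ → Spec_f start end_ (f start end_)

-- ===== LEMMAS AND PROOFS =====

-- the loop body of f_alt
def fStep (d : PySem.Dict Int Int) (x : Int) : PySem.Dict Int Int :=
  d.insert x (d.getD (x - 4) 0 + d.getD (x - 11) 0 + d.getD (PySem.Int.floordiv x 2) 0)

-- the table after processing range(end_+1, b)
def fTab (end_ b : Int) : PySem.Dict Int Int :=
  (PySem.List.pyRange (end_ + 1) b 1).foldl fStep ((PySem.Dict.empty).insert end_ 1)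

theorem f_base_lt {start end_ : Int} (h : start < end_) : f start end_ = 0 := by
  rw [f, if_neg (by omega), if_pos h]

theorem f_base_eq {end_ : Int} : f end_ end_ = 1 := by
  rw [f]; simp

theorem f_step (start end_ : Int) (h1 : end_ < start) (h2 : 0 ≤ end_) :
    f start end_ = f (start - 4) end_ + f (start - 11) end_ + f (PySem.Int.floordiv start 2) end_ := by
  rw [f, if_neg (by omega), if_neg (by omega), if_neg (by omega)]

-- invariant: after processing values up to end_+1+n the table agrees with f below end_+1+n
theorem fTab_inv (n : Nat) (end_ : Int) (h0 : 0 ≤ end_) :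
    ∀ k : Int, k < end_ + 1 + n → (fTab end_ (end_ + 1 + n)).getD k 0 = f k end_ := by
  induction n with
  | zero =>
    intro k hk
    have : PySem.List.pyRange (end_ + 1) (end_ + 1 + (0:Nat)) 1 = [] :=
      PySem.List.pyRange_one_eq_nil (by omega)
    rw [fTab, this]
    simp only [List.foldl_nil, PySem.Dict.getD_insert]
    by_cases hke : k = end_
    · simp [hke, f_base_eq]
    · have hklt : k < end_ := by omega
      simp [hke, f_base_lt hklt, PySem.Dict.getD, PySem.Dict.get?, PySem.Dict.empty]
  | succ m ih =>
    intro k hk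
    set x : Int := end_ + 1 + m with hx
    have hsplit : PySem.List.pyRange (end_ + 1) (end_ + 1 + (m + 1 : Nat)) 1
        = PySem.List.pyRange (end_ + 1) (end_ + 1 + m) 1 ++ [x] := by
      have : (end_ + 1 + (m + 1 : Nat)) = (end_ + 1 + m) + 1 := by push_cast; ring
      rw [this, PySem.List.pyRange_one_succ_right (by omega)]
    have htab : fTab end_ (end_ + 1 + (m + 1 : Nat)) = fStep (fTab end_ (end_ + 1 + m)) x := by
      rw [fTab, hsplit, List.foldl_append]; rfl
    rw [htab, fStep, PySem.Dict.getD_insert]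
    by_cases hkx : k = x
    · have hx1 : (1:Int) ≤ x := by omega
      have hfd_lt : PySem.Int.floordiv x 2 < x :=
        (PySem.Int.floordiv_lt_iff_lt_mul (a := x) (q := x) (by omega)).mpr (by omega)
      rw [if_pos hkx, hkx, f_step x end_ (by omega) h0,
          ih (x - 4) (by omega), ih (x - 11) (by omega), ih (PySem.Int.floordiv x 2) hfd_lt]
    · rw [if_neg hkx]
      exact ih k (by push_cast at hk; omega)

theorem f_eq_alt (start end_ : Int) (hpre : Pre_f start end_) :
    f start end_ = f_alt start end_ := by
  by_cases hlt : start < end_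
  · rw [f_base_lt hlt, f_alt, if_pos hlt]
  · by_cases heq : start = end_
    · subst heq
      rw [f_base_eq, f_alt, if_neg hlt]
      have : PySem.List.pyRange (start + 1) (start + 1) 1 = [] :=
        PySem.List.pyRange_one_eq_nil le_rfl
      simp [this]
    · have hgt : end_ < start := by omega
      have hpre' : start ≤ end_ ∨ 0 ≤ end_ := hpre
      have h0 : 0 ≤ end_ := by omega
      rw [f_alt, if_neg hlt]
      have hn : start + 1 = end_ + 1 + ((start - end_).toNat : Int) := by omega
      have := fTab_inv (start - end_).toNat end_ h0 start (by omega)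
      rw [fTab] at this
      simp only []
      rw [hn, ← this]
      rfl

-- ===== VERDICT (by name: the statement is the Claim_ definition above) =====
theorem f_spec : Claim_equal_f := by
  intro start end_ _ hpre
  unfold Spec_f
  exact f_eq_alt start end_ hpre
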